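-- pv_equiv track=rewrite | github.com/ark2016/VK-Technopark-project-2024 | data_mining/tests/functions/file_1021_1040.py | find_divisors_in_list_2
-- ===== SOURCE A (Python) =====
-- def find_divisors_in_list_2(lst):
--     result = []
--     for num in lst:
--         for other in lst:
--             if other != num and other % num == 0:
--                 result.append(num)
--                 break
--     if not result:
--         return None
--     return result
-- ===== SOURCE B (Python) =====
-- def find_divisors_in_list_2(lst):
--     # Mark each value that divides some other element by enumerating, for every
--     # distinct element w, the divisors of |w| in O(sqrt|w|); then one filter pass.
--     present = set(lst)
--     marked = set()
--     for w in present: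
--         a = -w if w < 0 else w
--         d = 1
--         while d * d <= a:
--             if a % d == 0:
--                 q = a // d
--                 for v in (d, -d, q, -q):
--                     if v != w and v in present:
--                         marked.add(v)
--             d += 1
--     result = [x for x in lst if x in marked]
--     return result if result else None
-- ===== Notes on version B (the rewrite author's own statement) =====
-- stated objective: faster
-- what changed: B replaces A's nested list scan (for each num, rescan the whole list for a multiple) by divisor enumeration: for each distinct element w it enumerates the divisors of |w| up to sqrt(|w|) and marks the present ones, then one order-preserving filter pass over lst.
import Mathlib
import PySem

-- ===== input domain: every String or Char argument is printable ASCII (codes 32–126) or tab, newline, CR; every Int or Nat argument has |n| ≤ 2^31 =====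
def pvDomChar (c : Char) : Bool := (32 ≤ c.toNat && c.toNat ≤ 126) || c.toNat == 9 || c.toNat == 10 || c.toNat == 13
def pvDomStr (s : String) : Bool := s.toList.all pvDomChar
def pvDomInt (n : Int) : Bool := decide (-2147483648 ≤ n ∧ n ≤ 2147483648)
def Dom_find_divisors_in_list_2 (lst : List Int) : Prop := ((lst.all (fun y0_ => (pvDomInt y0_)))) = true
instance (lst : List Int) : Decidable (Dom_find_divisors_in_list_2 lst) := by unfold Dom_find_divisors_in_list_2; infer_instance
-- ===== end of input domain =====

-- B marks the qualifying values by enumerating the divisors of each distinct |w| up to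
-- its square root instead of A's nested list scan; return values only.

-- ===== PORT A =====
-- A: for each num, scan the whole list for some other with other != num and other % num == 0
-- (inner break = List.any); inside Pre_ the short-circuit '&&' never evaluates mod by 0.
def find_divisors_in_list_2 (lst : List Int) : Option (List Int) :=
  let result := lst.foldl (fun acc num =>
    if lst.any (fun other => other != num && PySem.Int.mod other num == 0)
    then acc ++ [num] else acc) []
  if result = [] then none else some result

-- ===== PORT B =====
-- B's while loop 'd = 1; while d*d <= a: …; d += 1' over the divisors of a = |w|;
-- a and d are nonnegative throughout, so Nat % and / are exact for Python's % and //.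
-- The loop is ported with a structural fuel counter (= the remaining iteration bound
-- a + 1 - d, enough since the loop stops once d*d > a); the guard d*d ≤ a is Python's.
def pvMarkStep (present : PySem.Set Int) (w : Int) (a d : Nat)
    (marked : PySem.Set Int) : PySem.Set Int :=
  if a % d = 0 then
    let q := a / d
    [(d : Int), -(d : Int), (q : Int), -(q : Int)].foldl
      (fun m v => if v ≠ w ∧ PySem.Set.contains present v then PySem.Set.add m v else m)
      marked
  else marked

def pvMarkDivsGo (present : PySem.Set Int) (w : Int) (a : Nat) :
    Nat → Nat → PySem.Set Int → PySem.Set Int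
  | 0, _, m => m
  | fuel + 1, d, m =>
      if d * d ≤ a then
        pvMarkDivsGo present w a fuel (d + 1) (pvMarkStep present w a d m)
      else m

def pvMarkDivs (present : PySem.Set Int) (w : Int) (a : Nat) (d : Nat)
    (marked : PySem.Set Int) : PySem.Set Int :=
  pvMarkDivsGo present w a (a + 1 - d) d marked

def find_divisors_in_list_2_alt (lst : List Int) : Option (List Int) :=
  let present : PySem.Set Int := PySem.Set.ofList lst
  let marked : PySem.Set Int :=
    present.foldl (fun m w => pvMarkDivs present w w.natAbs 1 m) PySem.Set.empty
  let result := lst.filter (fun x => PySem.Set.contains marked x)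
  if result = [] then none else some result

-- ===== PRECONDITION & SPEC =====
-- Pre_ excludes exactly the inputs where A raises ZeroDivisionError: 0 in lst together
-- with some non-zero element (the inner `other % num` with num = 0 is reached).
def Pre_find_divisors_in_list_2 (lst : List Int) : Prop :=
  ¬ ((0 : Int) ∈ lst ∧ ∃ x ∈ lst, x ≠ 0)
instance (lst : List Int) : Decidable (Pre_find_divisors_in_list_2 lst) := by
  unfold Pre_find_divisors_in_list_2; infer_instance

def pvWitness_find_divisors_in_list_2 : List Int := [2, 4, 3, 7]

def Spec_find_divisors_in_list_2 (lst : List Int) (out : Option (List Int)) : Prop := out = find_divisors_in_list_2_alt lst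
instance (lst : List Int) (out : Option (List Int)) : Decidable (Spec_find_divisors_in_list_2 lst out) := by unfold Spec_find_divisors_in_list_2; infer_instance

-- ===== CLAIM (what is proved, stated in full; the proofs are below) =====
def Claim_equal_find_divisors_in_list_2 : Prop := ∀ (lst : List Int), Dom_find_divisors_in_list_2 lst → Pre_find_divisors_in_list_2 lst → Spec_find_divisors_in_list_2 lst (find_divisors_in_list_2 lst)

-- ===== LEMMAS AND PROOFS =====

-- Folding conditional adds over a list marks exactly its elements satisfying the test.
theorem mem_foldl_add_if {p : Int → Prop} [DecidablePred p] (xs : List Int)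
    (m : PySem.Set Int) (v : Int) :
    v ∈ xs.foldl (fun m x => if p x then PySem.Set.add m x else m) m ↔
      v ∈ m ∨ (v ∈ xs ∧ p v) := by
  induction xs generalizing m with
  | nil => simp
  | cons x xs ih =>
    simp only [List.foldl_cons, ih]
    by_cases hx : p x <;> by_cases hv : v = x
    · subst hv; simp [hx, PySem.Set.mem_add]; try tauto
    · simp [hx, hv, PySem.Set.mem_add]; try tauto
    · subst hv; simp [hx]; try tauto
    · simp [hx, hv]; try tauto

-- One body of B's while loop.
theorem mem_pvMarkStep (present : PySem.Set Int) (w : Int) (a d : Nat)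
    (m : PySem.Set Int) (v : Int) :
    v ∈ pvMarkStep present w a d m ↔
      v ∈ m ∨ (a % d = 0 ∧ v ≠ w ∧ v ∈ present ∧
        (v = (d : Int) ∨ v = -(d : Int) ∨ v = ((a / d : Nat) : Int) ∨ v = -((a / d : Nat) : Int))) := by
  unfold pvMarkStep
  by_cases h : a % d = 0
  · simp only [if_pos h]
    rw [mem_foldl_add_if (p := fun x => x ≠ w ∧ PySem.Set.contains present x)]
    simp [h]
    tauto
  · simp [h]

-- Membership after the fueled while loop, given enough fuel.
theorem mem_pvMarkDivsGo (present : PySem.Set Int) (w : Int) (a : Nat)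
    (fuel d : Nat) (m : PySem.Set Int) (v : Int) (hf : a + 1 ≤ fuel + d) :
    v ∈ pvMarkDivsGo present w a fuel d m ↔
      v ∈ m ∨ (v ≠ w ∧ v ∈ present ∧
        ∃ e : Nat, d ≤ e ∧ e * e ≤ a ∧ a % e = 0 ∧
          (v = (e : Int) ∨ v = -(e : Int) ∨ v = ((a / e : Nat) : Int) ∨ v = -((a / e : Nat) : Int))) := by
  induction fuel generalizing d m with
  | zero =>
    simp only [pvMarkDivsGo]
    have : ¬ ∃ e : Nat, d ≤ e ∧ e * e ≤ a ∧ a % e = 0 ∧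
        (v = (e : Int) ∨ v = -(e : Int) ∨ v = ((a / e : Nat) : Int) ∨ v = -((a / e : Nat) : Int)) := by
      rintro ⟨e, hde, hee, -, -⟩
      have he1 : 1 ≤ e := by omega
      have : e ≤ e * e := Nat.le_mul_of_pos_left e he1
      omega
    exact ⟨Or.inl, fun h => h.elim id (fun ⟨_, _, he⟩ => absurd he this)⟩
  | succ fuel ih =>
    simp only [pvMarkDivsGo]
    by_cases hda : d * d ≤ a
    · rw [if_pos hda, ih (d + 1) _ (by omega), mem_pvMarkStep]
      constructor
      · rintro ((hm | ⟨hmod, hvw, hvp, hcand⟩) | ⟨hvw, hvp, e, hde, h1, h2, h3⟩)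
        · exact Or.inl hm
        · exact Or.inr ⟨hvw, hvp, d, le_refl d, hda, hmod, hcand⟩
        · exact Or.inr ⟨hvw, hvp, e, by omega, h1, h2, h3⟩
      · rintro (hm | ⟨hvw, hvp, e, hde, h1, h2, h3⟩)
        · exact Or.inl (Or.inl hm)
        · rcases Nat.eq_or_lt_of_le hde with heq | hlt
          · exact Or.inl (Or.inr ⟨heq ▸ h2, hvw, hvp, heq ▸ h3⟩)
          · exact Or.inr ⟨hvw, hvp, e, by omega, h1, h2, h3⟩
    · rw [if_neg hda]
      have : ¬ ∃ e : Nat, d ≤ e ∧ e * e ≤ a ∧ a % e = 0 ∧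
          (v = (e : Int) ∨ v = -(e : Int) ∨ v = ((a / e : Nat) : Int) ∨ v = -((a / e : Nat) : Int)) := by
        rintro ⟨e, hde, hee, -, -⟩
        have : d * d ≤ e * e := Nat.mul_le_mul hde hde
        omega
      exact ⟨Or.inl, fun h => h.elim id (fun ⟨_, _, he⟩ => absurd he this)⟩

-- The √-bounded candidate set is exactly the nonzero divisors of a (a ≥ 1).
theorem divisor_candidates (a : Nat) (ha : 1 ≤ a) (v : Int) :
    (∃ e : Nat, 1 ≤ e ∧ e * e ≤ a ∧ a % e = 0 ∧
      (v = (e : Int) ∨ v = -(e : Int) ∨ v = ((a / e : Nat) : Int) ∨ v = -((a / e : Nat) : Int)))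
    ↔ (v ≠ 0 ∧ v.natAbs ∣ a) := by
  constructor
  · rintro ⟨e, he1, hee, hmod, hv⟩
    have hdvd : e ∣ a := Nat.dvd_of_mod_eq_zero hmod
    have hea : e ≤ a := le_trans (Nat.le_mul_of_pos_left e he1) hee
    have hq1 : 1 ≤ a / e := Nat.div_pos hea (by omega)
    have hqdvd : a / e ∣ a := Nat.div_dvd_of_dvd hdvd
    have he0 : ((e : Nat) : Int) ≠ 0 := by exact_mod_cast (by omega : e ≠ 0)
    have hq0 : (((a / e : Nat)) : Int) ≠ 0 := by exact_mod_cast (by omega : a / e ≠ 0)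
    rcases hv with hv | hv | hv | hv <;> subst hv
    · exact ⟨he0, by simpa using hdvd⟩
    · exact ⟨neg_ne_zero.mpr he0, by simpa using hdvd⟩
    · exact ⟨hq0, by simpa using hqdvd⟩
    · exact ⟨neg_ne_zero.mpr hq0, by simpa using hqdvd⟩
  · rintro ⟨hv0, hdvd⟩
    set k := v.natAbs with hk
    have hk1 : 1 ≤ k := by
      rcases Nat.eq_zero_or_pos k with h | h
      · exact absurd (Int.natAbs_eq_zero.mp h) hv0
      · exact h
    have hka : k ≤ a := Nat.le_of_dvd (by omega) hdvd
    have hvk : v = (k : Int) ∨ v = -(k : Int) := Int.natAbs_eq v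
    by_cases hkk : k * k ≤ a
    · refine ⟨k, hk1, hkk, Nat.mod_eq_zero_of_dvd hdvd, ?_⟩
      rcases hvk with h | h
      · exact Or.inl h
      · exact Or.inr (Or.inl h)
    · -- use e = a / k, the cofactor
      have he1 : 1 ≤ a / k := Nat.div_pos hka (by omega)
      have hmul : a / k * k = a := Nat.div_mul_cancel hdvd
      have hek : a / k ≤ k := by
        by_contra h
        push Not at h
        have : k * k < (a / k) * k := by
          exact Nat.mul_lt_mul_of_lt_of_le h (le_refl k) (by omega)
        omega
      refine ⟨a / k, he1, ?_, ?_, ?_⟩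
      · calc a / k * (a / k) ≤ a / k * k := Nat.mul_le_mul_left _ hek
          _ = a := hmul
      · exact Nat.mod_eq_zero_of_dvd (Nat.div_dvd_of_dvd hdvd)
      · have : a / (a / k) = k := Nat.div_div_self hdvd (by omega)
        rw [this]
        rcases hvk with h | h
        · exact Or.inr (Or.inr (Or.inl h))
        · exact Or.inr (Or.inr (Or.inr h))

-- Characterisation of B's marked set.
theorem mem_marked_fold (present : PySem.Set Int) (l : List Int)
    (m0 : PySem.Set Int) (v : Int) :
    v ∈ l.foldl (fun m w => pvMarkDivs present w w.natAbs 1 m) m0 ↔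
      v ∈ m0 ∨ ∃ w ∈ l, v ≠ w ∧ v ∈ present ∧ w ≠ 0 ∧ v ≠ 0 ∧ v ∣ w := by
  induction l generalizing m0 with
  | nil => simp
  | cons w l ih =>
    simp only [List.foldl_cons, ih]
    have hone : v ∈ pvMarkDivs present w w.natAbs 1 m0 ↔
        v ∈ m0 ∨ (v ≠ w ∧ v ∈ present ∧ w ≠ 0 ∧ v ≠ 0 ∧ v ∣ w) := by
      unfold pvMarkDivs
      rw [mem_pvMarkDivsGo present w w.natAbs (w.natAbs + 1 - 1) 1 m0 v (by omega)]
      by_cases hw : w = 0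
      · subst hw
        constructor
        · rintro (hm | ⟨-, -, e, he1, hee, -, -⟩)
          · exact Or.inl hm
          · exfalso
            have he : e ≤ e * e := Nat.le_mul_of_pos_left e he1
            simp only [Int.natAbs_zero] at hee
            omega
        · rintro (hm | ⟨-, -, h, -⟩)
          · exact Or.inl hm
          · exact absurd rfl h
      · have ha : 1 ≤ w.natAbs := by
          rcases Nat.eq_zero_or_pos w.natAbs with h | h
          · exact absurd (Int.natAbs_eq_zero.mp h) hw
          · exact h
        constructor
        · rintro (hm | ⟨hvw, hvp, he⟩)
          · exact Or.inl hm
          · have := (divisor_candidates w.natAbs ha v).mp he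
            exact Or.inr ⟨hvw, hvp, hw, this.1, Int.natAbs_dvd_natAbs.mp this.2⟩
        · rintro (hm | ⟨hvw, hvp, -, hv0, hdvd⟩)
          · exact Or.inl hm
          · exact Or.inr ⟨hvw, hvp,
              (divisor_candidates w.natAbs ha v).mpr ⟨hv0, Int.natAbs_dvd_natAbs.mpr hdvd⟩⟩
    rw [hone]
    constructor
    · rintro (⟨hm | hw'⟩ | ⟨w', hw', rest⟩)
      · exact Or.inl hm
      · exact Or.inr ⟨w, List.mem_cons_self, hw'⟩
      · exact Or.inr ⟨w', List.mem_cons_of_mem _ hw', rest⟩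
    · rintro (hm | ⟨w', hw', rest⟩)
      · exact Or.inl (Or.inl hm)
      · rcases List.mem_cons.mp hw' with h | h
        · exact Or.inl (Or.inr (h ▸ rest))
        · exact Or.inr ⟨w', h, rest⟩

-- ===== VERDICT (by name: the statement is the Claim_ definition above) =====
theorem find_divisors_in_list_2_spec : Claim_equal_find_divisors_in_list_2 := by
  intro lst _ hpre
  unfold Spec_find_divisors_in_list_2 find_divisors_in_list_2 find_divisors_in_list_2_alt
  simp only
  rw [PySem.List.foldl_append_if_eq_filter]
  have hfilter :
      lst.filter (fun num => lst.any (fun other => other != num && PySem.Int.mod other num == 0))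
        = lst.filter (fun x => PySem.Set.contains
            ((PySem.Set.ofList lst).foldl
              (fun m w => pvMarkDivs (PySem.Set.ofList lst) w w.natAbs 1 m) PySem.Set.empty) x) := by
    apply List.filter_congr
    intro num hnum
    rw [Bool.eq_iff_iff]
    rw [PySem.Set.contains_iff]
    rw [mem_marked_fold]
    simp only [List.any_eq_true, bne_iff_ne, Bool.and_eq_true, beq_iff_eq, ne_eq,
      PySem.Set.empty, List.not_mem_nil, false_or]
    constructor
    · rintro ⟨o, ho, hne, hmod⟩
      have hdvd : num ∣ o := (PySem.Int.mod_eq_zero_iff_dvd o num).mp hmod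
      have hnum0 : num ≠ 0 := by
        rintro rfl
        exact hne (by simpa using hdvd)
      have ho0 : o ≠ 0 := by
        rintro rfl
        exact hpre ⟨ho, num, hnum, hnum0⟩
      exact ⟨o, (PySem.Set.mem_ofList lst o).mpr ho, fun h => hne h.symm,
        (PySem.Set.mem_ofList lst num).mpr hnum, ho0, hnum0, hdvd⟩
    · rintro ⟨w, hw, hne, -, hw0, hnum0, hdvd⟩
      exact ⟨w, (PySem.Set.mem_ofList lst w).mp hw, fun h => hne h.symm,
        (PySem.Int.mod_eq_zero_iff_dvd w num).mpr hdvd⟩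
  rw [hfilter]
  simp
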